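-- pv_equiv track=rewrite | github.com/aaabbbcccdddeeef/leetcode | Everyday/lccup22/1.py | temperatureTrend
-- ===== SOURCE A (Python) =====
-- from typing import List
--
-- def temperatureTrend(ta: List[int], tb: List[int]) -> int:
--     res = 0
--     p = 1
--     minLen = min(len(ta), len(tb))
--     while p < minLen:
--         tmp_res = 0
--         while (p < minLen) and (
--             (ta[p] - ta[p - 1] > 0 and tb[p] - tb[p - 1] > 0) or
--             (ta[p] - ta[p - 1] == 0 and tb[p] - tb[p - 1] == 0) or
--             (ta[p] - ta[p - 1] < 0 and tb[p] - tb[p - 1] < 0)):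
--             tmp_res += 1
--             p += 1
--         p += 1
--         res = max(res, tmp_res)
--     return res
-- ===== SOURCE B (Python) =====
-- def temperatureTrend(ta, tb):
--     m = min(len(ta), len(tb))
--     breaks = [j for j in range(1, m)
--               if ((ta[j] - ta[j - 1] > 0) - (ta[j] - ta[j - 1] < 0))
--                  != ((tb[j] - tb[j - 1] > 0) - (tb[j] - tb[j - 1] < 0))]
--     breaks.append(m)
--     best = 0
--     prev = 0
--     for c in breaks:
--         if c - prev - 1 > best:
--             best = c - prev - 1
--         prev = c
--     return best
-- ===== Notes on version B (the rewrite author's own statement) =====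
-- stated objective: alternative
-- what changed: Instead of scanning with nested while loops that count and reset a current run, B computes the list of break positions (indices where the sign of the consecutive difference of ta disagrees with that of tb, plus a sentinel at the end) and returns the maximal gap between consecutive break positions.
import Mathlib
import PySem

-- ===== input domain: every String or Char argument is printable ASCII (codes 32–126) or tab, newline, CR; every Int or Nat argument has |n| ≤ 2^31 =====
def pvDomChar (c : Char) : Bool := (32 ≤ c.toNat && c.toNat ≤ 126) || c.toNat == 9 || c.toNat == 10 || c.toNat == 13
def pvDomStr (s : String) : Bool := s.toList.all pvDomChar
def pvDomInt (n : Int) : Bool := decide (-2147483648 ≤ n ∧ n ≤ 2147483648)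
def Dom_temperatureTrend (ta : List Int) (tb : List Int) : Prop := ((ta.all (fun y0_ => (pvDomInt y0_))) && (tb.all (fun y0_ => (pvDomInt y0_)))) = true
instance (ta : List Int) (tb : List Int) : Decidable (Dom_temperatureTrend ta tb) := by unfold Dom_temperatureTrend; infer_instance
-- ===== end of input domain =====

-- B replaces A's nested run-counting/reset while loops by a break-position list: it collects
-- the indices where the two difference signs disagree (plus an end sentinel) and returns the
-- maximal gap between consecutive breaks (objective: alternative, same O(n) cost).

-- ===== PORT A =====
-- xs[i]: every index A uses is in range (1 ≤ p < min length), so the IndexError case never occurs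
def pvIdx (xs : List Int) (i : Int) : Int := (PySem.List.pyGet? xs i).getD 0

def tT_cond (ta tb : List Int) (p : Int) : Bool :=
  (decide (pvIdx ta p - pvIdx ta (p-1) > 0) && decide (pvIdx tb p - pvIdx tb (p-1) > 0)) ||
  (decide (pvIdx ta p - pvIdx ta (p-1) = 0) && decide (pvIdx tb p - pvIdx tb (p-1) = 0)) ||
  (decide (pvIdx ta p - pvIdx ta (p-1) < 0) && decide (pvIdx tb p - pvIdx tb (p-1) < 0))

-- the inner while loop, as structural recursion on a fuel that bounds the remaining iterations
def tT_inner (ta tb : List Int) (minLen : Int) : Nat → Int → Int → Int × Int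
  | 0, p, tmp => (tmp, p)
  | f+1, p, tmp =>
    if p < minLen ∧ tT_cond ta tb p = true then tT_inner ta tb minLen f (p+1) (tmp+1)
    else (tmp, p)

-- the outer while loop (fuel likewise; the wrapper supplies enough fuel for both loops)
def tT_outer (ta tb : List Int) (minLen : Int) : Nat → Int → Int → Int
  | 0, _, res => res
  | f+1, p, res =>
    if p < minLen then
      tT_outer ta tb minLen f ((tT_inner ta tb minLen (f+1) p 0).2 + 1)
        (max res (tT_inner ta tb minLen (f+1) p 0).1)
    else res

def temperatureTrend (ta : List Int) (tb : List Int) : Int :=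
  tT_outer ta tb (min (ta.length : Int) (tb.length : Int))
    (min (ta.length : Int) (tb.length : Int)).toNat 1 0

-- ===== PORT B =====
-- (d > 0) - (d < 0)
def pySgn (x : Int) : Int := (if x > 0 then 1 else 0) - (if x < 0 then 1 else 0)

-- j is a break position: the signs of the consecutive differences disagree
def tT_breakAt (ta tb : List Int) (j : Int) : Bool :=
  !(pySgn (pvIdx ta j - pvIdx ta (j-1)) == pySgn (pvIdx tb j - pvIdx tb (j-1)))

-- the for-loop body over a break position: state = (prev, best)
def tT_gapStep (st : Int × Int) (c : Int) : Int × Int :=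
  (c, if c - st.1 - 1 > st.2 then c - st.1 - 1 else st.2)

def temperatureTrend_alt (ta tb : List Int) : Int :=
  let m : Int := min (ta.length : Int) (tb.length : Int)
  let breaks := (PySem.List.pyRange 1 m 1).filter (tT_breakAt ta tb) ++ [m]
  (breaks.foldl tT_gapStep (0, 0)).2

-- ===== PRECONDITION & SPEC =====
def Spec_temperatureTrend (ta : List Int) (tb : List Int) (out : Int) : Prop := out = temperatureTrend_alt ta tb
instance (ta : List Int) (tb : List Int) (out : Int) : Decidable (Spec_temperatureTrend ta tb out) := by unfold Spec_temperatureTrend; infer_instance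

-- ===== CLAIM (what is proved, stated in full; the proofs are below) =====
def Claim_equal_temperatureTrend : Prop := ∀ (ta : List Int) (tb : List Int), Dom_temperatureTrend ta tb → Spec_temperatureTrend ta tb (temperatureTrend ta tb)

-- ===== LEMMAS AND PROOFS =====

-- A's loops, rephrased as a single run-counting fold over [p, m) (proof-only intermediate)
def tT_G (ta tb : List Int) (m p : Int) (st : Int × Int) : Int × Int :=
  (PySem.List.pyRange p m 1).foldl
    (fun st i => if tT_cond ta tb i then (st.1 + 1, max st.2 (st.1 + 1)) else (0, st.2)) st

-- B's gap computation, restarted at an arbitrary index p with an arbitrary (prev, best) state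
def tT_B (ta tb : List Int) (m p prev best : Int) : Int :=
  ((((PySem.List.pyRange p m 1).filter (tT_breakAt ta tb)) ++ [m]).foldl tT_gapStep (prev, best)).2

theorem tT_inner_stop (ta tb : List Int) (minLen : Int) (f : Nat) (p tmp : Int)
    (h : ¬ (p < minLen ∧ tT_cond ta tb p = true)) :
    tT_inner ta tb minLen f p tmp = (tmp, p) := by
  cases f <;> simp [tT_inner, h]

theorem tT_outer_stop (ta tb : List Int) (minLen : Int) (f : Nat) (p res : Int)
    (h : ¬ p < minLen) :
    tT_outer ta tb minLen f p res = res := by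
  cases f <;> simp [tT_outer, h]

theorem breakAt_eq_not_cond (ta tb : List Int) (p : Int) :
    tT_breakAt ta tb p = !(tT_cond ta tb p) := by
  rw [tT_breakAt, tT_cond]
  simp only [pySgn]
  split_ifs <;> simp_all <;> omega

theorem tT_G_cons (ta tb : List Int) (m p : Int) (st : Int × Int) (hplt : p < m) :
    tT_G ta tb m p st
      = tT_G ta tb m (p+1)
          (if tT_cond ta tb p then (st.1 + 1, max st.2 (st.1 + 1)) else (0, st.2)) := by
  rw [tT_G, PySem.List.pyRange_one_cons hplt, List.foldl_cons]; rfl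

theorem tT_G_nil (ta tb : List Int) (m p : Int) (st : Int × Int) (h : m ≤ p) :
    tT_G ta tb m p st = st := by
  simp [tT_G, PySem.List.pyRange_one_eq_nil h]

theorem tT_B_nil (ta tb : List Int) (m p prev best : Int) (h : m ≤ p) :
    tT_B ta tb m p prev best = max best (m - prev - 1) := by
  simp only [tT_B, PySem.List.pyRange_one_eq_nil h, List.filter_nil, List.nil_append,
    List.foldl_cons, List.foldl_nil, tT_gapStep]
  split_ifs <;> omega

theorem tT_B_cons (ta tb : List Int) (m p prev best : Int) (hplt : p < m) :
    tT_B ta tb m p prev best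
      = if tT_breakAt ta tb p
          then tT_B ta tb m (p+1) p (max best (p - 1 - prev))
          else tT_B ta tb m (p+1) prev best := by
  rw [tT_B, PySem.List.pyRange_one_cons hplt, List.filter_cons]
  by_cases hb : tT_breakAt ta tb p = true
  · simp only [hb, if_pos, List.cons_append, List.foldl_cons, tT_gapStep]
    rw [tT_B]
    congr 2
    simp only [Prod.mk.injEq, true_and]
    split_ifs <;> omega
  · simp [hb, tT_B]

-- main invariant: the run-counting fold and the gap fold compute the same maximum
theorem tT_run_eq_gap (ta tb : List Int) (m : Int) (n : Nat) : ∀ p : Int,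
    (m - p).toNat ≤ n → p ≤ m → ∀ prev best : Int, prev ≤ p - 1 → 0 ≤ best →
    (tT_G ta tb m p (p - 1 - prev, max best (p - 1 - prev))).2 = tT_B ta tb m p prev best := by
  induction n with
  | zero =>
    intro p hn hp prev best hprev hbest
    have hmp : m ≤ p := by omega
    rw [tT_G_nil ta tb m p _ hmp, tT_B_nil ta tb m p prev best hmp]
    simp only
    omega
  | succ n ih =>
    intro p hn hp prev best hprev hbest
    by_cases hmp : m ≤ p
    · rw [tT_G_nil ta tb m p _ hmp, tT_B_nil ta tb m p prev best hmp]
      simp only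
      omega
    · have hplt : p < m := by omega
      rw [tT_G_cons ta tb m p _ hplt, tT_B_cons ta tb m p prev best hplt,
        breakAt_eq_not_cond]
      by_cases hc : tT_cond ta tb p = true
      · rw [if_pos hc, if_neg (by simp [hc])]
        simp only
        have h1 : (p - 1 - prev : Int) + 1 = (p + 1) - 1 - prev := by omega
        have h2 : max (max best (p - 1 - prev)) ((p + 1 : Int) - 1 - prev)
            = max best ((p + 1) - 1 - prev) := by omega
        rw [h1, h2]
        exact ih (p+1) (by omega) (by omega) prev best (by omega) hbest
      · have hc' : tT_cond ta tb p = false := by revert hc; cases tT_cond ta tb p <;> simp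
        rw [if_neg hc, if_pos (by simp [hc'])]
        have := ih (p+1) (by omega) (by omega) p (max best (p - 1 - prev)) (by omega) (by omega)
        have h0 : ((p + 1 : Int) - 1 - p) = 0 := by omega
        rw [h0] at this
        have h1 : max (max best (p - 1 - prev)) (0:Int) = max best (p - 1 - prev) := by omega
        rw [h1] at this
        exact this

-- A's nested while loops compute the run-counting fold tT_G
theorem tT_main (ta tb : List Int) (m : Int) (n : Nat) : ∀ p : Int, (m - p).toNat ≤ n →
    (∀ (f : Nat) (res : Int), (m - p).toNat ≤ f → 0 ≤ res → p ≤ m →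
        tT_outer ta tb m f p res = (tT_G ta tb m p (0, res)).2)
    ∧ (∀ (fi fo : Nat) (tmp res : Int), (m - p).toNat ≤ fi → (m - p).toNat ≤ fo + 1 →
        0 ≤ res → 0 ≤ tmp → p ≤ m →
        tT_outer ta tb m fo ((tT_inner ta tb m fi p tmp).2 + 1)
            (max res (tT_inner ta tb m fi p tmp).1)
          = (tT_G ta tb m p (tmp, max res tmp)).2) := by
  induction n with
  | zero =>
    intro p hn
    constructor
    · intro f res hf hres hp
      rw [tT_outer_stop ta tb m f p res (by omega), tT_G_nil ta tb m p _ (by omega)]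
    · intro fi fo tmp res hfi hfo hres htmp hp
      rw [tT_inner_stop ta tb m fi p tmp (by rintro ⟨h1, h2⟩; omega)]
      simp only
      rw [tT_outer_stop ta tb m fo (p+1) _ (by omega), tT_G_nil ta tb m p _ (by omega)]
  | succ n ih =>
    intro p hn
    by_cases hmp : m ≤ p
    · constructor
      · intro f res hf hres hp
        rw [tT_outer_stop ta tb m f p res (by omega), tT_G_nil ta tb m p _ (by omega)]
      · intro fi fo tmp res hfi hfo hres htmp hp
        rw [tT_inner_stop ta tb m fi p tmp (by rintro ⟨h1, h2⟩; omega)]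
        simp only
        rw [tT_outer_stop ta tb m fo (p+1) _ (by omega), tT_G_nil ta tb m p _ (by omega)]
    · have hplt : p < m := by omega
      have hinner : ∀ (fi fo : Nat) (tmp res : Int), (m - p).toNat ≤ fi → (m - p).toNat ≤ fo + 1 →
          0 ≤ res → 0 ≤ tmp → p ≤ m →
          tT_outer ta tb m fo ((tT_inner ta tb m fi p tmp).2 + 1)
              (max res (tT_inner ta tb m fi p tmp).1)
            = (tT_G ta tb m p (tmp, max res tmp)).2 := by
        intro fi fo tmp res hfi hfo hres htmp hp
        obtain ⟨f', rfl⟩ : ∃ f', fi = f' + 1 := ⟨fi - 1, by omega⟩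
        by_cases hc : tT_cond ta tb p = true
        · -- condition holds: the inner loop advances, the run fold extends the run
          rw [show tT_inner ta tb m (f'+1) p tmp = tT_inner ta tb m f' (p+1) (tmp+1) by
                simp [tT_inner, hplt, hc]]
          rw [tT_G_cons ta tb m p _ hplt]
          simp only [hc, if_pos]
          have h2 : max (max res tmp) ((tmp : Int) + 1) = max res (tmp + 1) := by omega
          simp only [h2]
          exact (ih (p+1) (by omega)).2 f' fo (tmp+1) res (by omega) (by omega) hres (by omega)
            (by omega)
        · -- condition fails: the inner loop stops here, the run fold resets
          rw [tT_inner_stop ta tb m (f'+1) p tmp (by rintro ⟨h1, h2⟩; exact hc h2)]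
          simp only
          rw [tT_G_cons ta tb m p _ hplt]
          simp only [hc, Bool.false_eq_true, if_false]
          exact (ih (p+1) (by omega)).1 fo (max res tmp) (by omega) (by omega) (by omega)
      refine ⟨?_, hinner⟩
      intro f res hf hres hp
      obtain ⟨f', rfl⟩ : ∃ f', f = f' + 1 := ⟨f - 1, by omega⟩
      rw [show tT_outer ta tb m (f'+1) p res
            = tT_outer ta tb m f' ((tT_inner ta tb m (f'+1) p 0).2 + 1)
                (max res (tT_inner ta tb m (f'+1) p 0).1) by simp [tT_outer, hplt]]
      have := hinner (f'+1) f' 0 res (by omega) (by omega) hres le_rfl hp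
      rw [show max res (0:Int) = res by omega] at this
      exact this

theorem alt_eq_B (ta tb : List Int) :
    temperatureTrend_alt ta tb
      = tT_B ta tb (min (ta.length : Int) (tb.length : Int)) 1 0 0 := by
  rfl

-- ===== VERDICT (by name: the statement is the Claim_ definition above) =====
theorem temperatureTrend_spec : Claim_equal_temperatureTrend := by
  intro ta tb _
  unfold Spec_temperatureTrend
  rw [alt_eq_B, temperatureTrend]
  set m : Int := min (ta.length : Int) (tb.length : Int) with hm
  have h0 : (0:Int) ≤ m := le_min (Int.natCast_nonneg _) (Int.natCast_nonneg _)
  by_cases h1 : 1 ≤ m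
  · rw [(tT_main ta tb m (m - 1).toNat 1 (by omega)).1 m.toNat 0 (by omega) le_rfl h1]
    have := tT_run_eq_gap ta tb m (m - 1).toNat 1 (by omega) h1 0 0 (by omega) le_rfl
    simpa using this
  · rw [tT_outer_stop ta tb m m.toNat 1 0 (by omega), tT_B_nil ta tb m 1 0 0 (by omega)]
    omega
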